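-- pv_equiv track=rewrite | github.com/BeeAnka/EFMlrs | efmlrs/preprocessing/boundaries.py | putting_slack_metas_together
-- ===== SOURCE A (Python) =====
-- def get_bounds_index(reas, bounds):
--     index_bounds = []
--     for rea, bound in bounds.items():
--         i = 0
--         for reaction in reas:
--             name = rea[:-4]
--             if reaction == name:
--                 index_bounds.append(i)
--             i += 1
--     return index_bounds
--
-- def extend_reactions(bounds, reactions):
--     index_bounds = get_bounds_index(reactions, bounds)
--     extended_reas = []
--     j = 0
--     for rea, bounds in bounds.items():
--         tmp = []
--         for i in range(len(reactions)):
--             if i == index_bounds[j]: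
--                 if rea[-3:] == "max":
--                     tmp.append(1)
--                 else:
--                     tmp.append(-1)
--             else:
--                 tmp.append(0)
--         j += 1
--         extended_reas.append(tmp)
--     return extended_reas
--
-- def build_boundary_reactions(bounds):
--     slack_reas = []
--     j = 0
--     for rea, bound in bounds.items():
--         tmp = []
--         for i in range(len(bounds)):
--             if i == j:
--                 tmp.append(1)
--             else:
--                 tmp.append(0)
--         j += 1
--         slack_reas.append(tmp)
--     return slack_reas
--
-- def build_lambda_reas(bounds):
--     lambda_reas = []
--     for rea, bound in bounds.items():
--         tmp = []
--         if rea[-3:] == "min":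
--             tmp.append(bound)
--         else:
--             new_bound = bound * -1
--             tmp.append(new_bound)
--         lambda_reas.append(tmp)
--     return lambda_reas
--
-- def putting_slack_metas_together(bounds, reactions):
--     extended_reactions = extend_reactions(bounds, reactions)
--     slack_reas = build_boundary_reactions(bounds)
--     lambda_reas = build_lambda_reas(bounds)
--     slack_metas = []
--     for i in range(len(bounds)):
--         tmp = extended_reactions[i] + slack_reas[i] + lambda_reas[i]
--         slack_metas.append(tmp)
--     return slack_metas
-- ===== SOURCE B (Python) =====
-- def putting_slack_metas_together(bounds, reactions):
--     name_index = {name: i for i, name in enumerate(reactions)}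
--     n = len(bounds)
--     slack_metas = []
--     for i, (rea, bound) in enumerate(bounds.items()):
--         row = [0] * len(reactions)
--         row[name_index[rea[:-4]]] = 1 if rea[-3:] == "max" else -1
--         row += [1 if k == i else 0 for k in range(n)]
--         row.append(bound if rea[-3:] == "min" else -bound)
--         slack_metas.append(row)
--     return slack_metas
-- ===== Notes on version B (the rewrite author's own statement) =====
-- stated objective: simpler
-- what changed: Replaces the four helper passes (flat index list, three separate matrices, then a concatenation-by-index loop) with one dict of reaction indices built once and a single loop over bounds that writes each full row directly.
-- outside the precondition, e.g. on putting_slack_metas_together({'R1_max': 5}, ['R1', 'R1']): A returns [[1, 0, 1, -5]], B returns [[0, 1, 1, -5]]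
import Mathlib
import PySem

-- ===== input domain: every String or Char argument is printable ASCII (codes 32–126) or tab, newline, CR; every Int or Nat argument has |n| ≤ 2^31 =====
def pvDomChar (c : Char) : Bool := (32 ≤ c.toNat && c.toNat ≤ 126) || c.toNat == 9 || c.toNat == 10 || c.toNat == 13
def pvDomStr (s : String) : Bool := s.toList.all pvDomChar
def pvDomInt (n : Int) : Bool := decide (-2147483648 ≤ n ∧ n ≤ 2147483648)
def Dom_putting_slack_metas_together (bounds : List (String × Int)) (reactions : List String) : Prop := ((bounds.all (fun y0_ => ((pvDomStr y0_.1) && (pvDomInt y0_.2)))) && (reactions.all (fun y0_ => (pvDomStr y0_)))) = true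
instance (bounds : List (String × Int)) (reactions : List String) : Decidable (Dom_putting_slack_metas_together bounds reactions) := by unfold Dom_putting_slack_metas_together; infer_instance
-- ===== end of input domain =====

-- B replaces A's four helper passes by one reaction-index dict and a single row-building loop (objective: simpler).

-- ===== PORT A =====
-- rea[:-4] and rea[-3:] (shared string helpers of both ports)
def pvName (rea : String) : String := PySem.Str.slice rea none (some (-4))
def pvSuf3 (rea : String) : String := PySem.Str.slice rea (some (-3)) none

-- helper get_bounds_index
def pvGetBoundsIndex (reas : List String) (bounds : List (String × Int)) : List Int :=
  bounds.foldl (fun acc p =>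
    (reas.foldl (fun (st : List Int × Int) reaction =>
        (if reaction == pvName p.1 then st.1 ++ [st.2] else st.1, st.2 + 1))
      (acc, 0)).1) []

-- helper extend_reactions (index_bounds[j]: pyGetD; Python raises IndexError out of range — excluded by Pre_)
def pvExtendReactions (bounds : List (String × Int)) (reactions : List String) : List (List Int) :=
  let index_bounds := pvGetBoundsIndex reactions bounds
  (bounds.foldl (fun (st : List (List Int) × Int) p =>
      let tmp := (PySem.List.pyRange 0 (reactions.length : Int) 1).map (fun i =>
        if i == PySem.List.pyGetD index_bounds st.2 0 then
          (if pvSuf3 p.1 == "max" then (1 : Int) else -1)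
        else 0)
      (st.1 ++ [tmp], st.2 + 1)) ([], 0)).1

-- helper build_boundary_reactions
def pvBuildBoundaryReactions (bounds : List (String × Int)) : List (List Int) :=
  (bounds.foldl (fun (st : List (List Int) × Int) _p =>
      let tmp := (PySem.List.pyRange 0 (bounds.length : Int) 1).map (fun i =>
        if i == st.2 then (1 : Int) else 0)
      (st.1 ++ [tmp], st.2 + 1)) ([], 0)).1

-- helper build_lambda_reas
def pvBuildLambdaReas (bounds : List (String × Int)) : List (List Int) :=
  bounds.foldl (fun acc p =>
    acc ++ [[if pvSuf3 p.1 == "min" then p.2 else p.2 * (-1)]]) []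

def putting_slack_metas_together (bounds : List (String × Int)) (reactions : List String) : List (List Int) :=
  let extended_reactions := pvExtendReactions bounds reactions
  let slack_reas := pvBuildBoundaryReactions bounds
  let lambda_reas := pvBuildLambdaReas bounds
  (PySem.List.pyRange 0 (bounds.length : Int) 1).foldl (fun acc i =>
    acc ++ [PySem.List.pyGetD extended_reactions i [] ++ PySem.List.pyGetD slack_reas i []
            ++ PySem.List.pyGetD lambda_reas i []]) []

-- ===== PORT B =====
def putting_slack_metas_together_alt (bounds : List (String × Int)) (reactions : List String) : List (List Int) :=
  let nameIndex : PySem.Dict String Int :=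
    (PySem.List.enumerate reactions 0).foldl (fun d p => d.insert p.2 p.1) PySem.Dict.empty
  let n := bounds.length
  (PySem.List.enumerate bounds 0).map (fun q =>
    let row0 := List.replicate reactions.length (0 : Int)
    -- row[name_index[rea[:-4]]] = ±1; a missing key is a Python KeyError — excluded by Pre_
    let row1 := match nameIndex.get? (pvName q.2.1) with
      | some j => PySem.List.pySetD row0 j (if pvSuf3 q.2.1 == "max" then 1 else -1)
      | none => row0
    row1 ++ (PySem.List.pyRange 0 (n : Int) 1).map (fun k => if k == q.1 then (1 : Int) else 0)
      ++ [if pvSuf3 q.2.1 == "min" then q.2.2 else -q.2.2])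

-- ===== PRECONDITION & SPEC =====
-- Pre_ excludes inputs where some bound's base name rea[:-4] is absent from reactions (there A raises
-- IndexError and B raises KeyError, or A's flat index list misaligns) or occurs more than once in
-- reactions (a first-vs-last-occurrence tie: A's flat list and B's dict pick different occurrences,
-- both accidental), and bounds lists with duplicate keys (a Python dict cannot hold them).
def Pre_putting_slack_metas_together (bounds : List (String × Int)) (reactions : List String) : Prop :=
  (bounds.map Prod.fst).Nodup ∧ ∀ p ∈ bounds, reactions.count (pvName p.1) = 1
instance (bounds : List (String × Int)) (reactions : List String) : Decidable (Pre_putting_slack_metas_together bounds reactions) := by unfold Pre_putting_slack_metas_together; infer_instance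
def pvWitness_putting_slack_metas_together : (List (String × Int)) × List String :=
  ([("R1_max", 5), ("R2_min", -3)], ["R1", "R2", "R3"])

def Spec_putting_slack_metas_together (bounds : List (String × Int)) (reactions : List String) (out : List (List Int)) : Prop := out = putting_slack_metas_together_alt bounds reactions
instance (bounds : List (String × Int)) (reactions : List String) (out : List (List Int)) : Decidable (Spec_putting_slack_metas_together bounds reactions out) := by unfold Spec_putting_slack_metas_together; infer_instance

-- ===== CLAIM (what is proved, stated in full; the proofs are below) =====
def Claim_equal_putting_slack_metas_together : Prop := ∀ (bounds : List (String × Int)) (reactions : List String), Dom_putting_slack_metas_together bounds reactions → Pre_putting_slack_metas_together bounds reactions → Spec_putting_slack_metas_together bounds reactions (putting_slack_metas_together bounds reactions)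

-- ===== LEMMAS AND PROOFS =====

-- A's inner scan appends nothing when name is absent
theorem pv_inner_none (reas : List String) (name : String) (acc : List Int) (c : Int)
    (h : name ∉ reas) :
    (reas.foldl (fun (st : List Int × Int) reaction =>
        (if reaction == name then st.1 ++ [st.2] else st.1, st.2 + 1)) (acc, c)).1 = acc := by
  induction reas generalizing acc c with
  | nil => rfl
  | cons r rs ih =>
    have hr : (r == name) = false := by
      simp only [beq_eq_false_iff_ne]
      exact fun he => h (he ▸ List.mem_cons_self)
    simp only [List.foldl_cons, hr, Bool.false_eq_true, if_false]
    exact ih acc (c+1) (fun hm => h (List.mem_cons_of_mem _ hm))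

-- with exactly one occurrence A's inner scan yields the single index c + idxOf
theorem pv_inner_unique (reas : List String) (name : String) (acc : List Int) (c : Int)
    (h : reas.count name = 1) :
    (reas.foldl (fun (st : List Int × Int) reaction =>
        (if reaction == name then st.1 ++ [st.2] else st.1, st.2 + 1)) (acc, c)).1
      = acc ++ [c + (reas.idxOf name : Int)] := by
  induction reas generalizing acc c with
  | nil => simp at h
  | cons r rs ih =>
    by_cases hr : r = name
    · subst hr
      have h0 : r ∉ rs := (List.count_eq_zero).mp (by simpa [List.count_cons] using h)
      simp only [List.foldl_cons, BEq.rfl, if_true]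
      rw [pv_inner_none rs r (acc ++ [c]) (c+1) h0, List.idxOf_cons_self]
      simp
    · have h1 : rs.count name = 1 := by simpa [List.count_cons, hr] using h
      have hrb : (r == name) = false := by simpa using hr
      simp only [List.foldl_cons, hrb, Bool.false_eq_true, if_false]
      rw [ih acc (c+1) h1, List.idxOf_cons_ne _ hr]
      congr 2
      push_cast
      ring

-- counter-carrying append loop = map over enumerate
theorem pv_counter_loop {α β : Type} (l : List α) (g : Int → α → β) (acc : List β) (c : Int) :
    (l.foldl (fun (st : List β × Int) x => (st.1 ++ [g st.2 x], st.2 + 1)) (acc, c)).1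
      = acc ++ (PySem.List.enumerate l c).map (fun q => g q.1 q.2) := by
  induction l generalizing acc c with
  | nil => simp [PySem.List.enumerate_nil]
  | cons x xs ih => simp [PySem.List.enumerate_cons, ih]

-- get_bounds_index, closed form under Pre_
theorem pv_index_bounds (bounds : List (String × Int)) (reactions : List String)
    (h : ∀ p ∈ bounds, reactions.count (pvName p.1) = 1) :
    pvGetBoundsIndex reactions bounds
      = bounds.map (fun p => (reactions.idxOf (pvName p.1) : Int)) := by
  unfold pvGetBoundsIndex
  rw [PySem.List.foldl_congr_mem bounds _
      (fun acc p => acc ++ [(reactions.idxOf (pvName p.1) : Int)]) []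
      (fun acc p hp => by
        rw [pv_inner_unique _ _ _ _ (h p hp)]
        simp)]
  rw [PySem.List.foldl_append_singleton_eq_map]
  simp

-- a ±1 one-hot row: comprehension over range = replicate-and-set
theorem pv_row_eq (m j : Nat) (s : Int) :
    (PySem.List.pyRange 0 (m : Int) 1).map (fun i => if i == (j : Int) then s else 0)
      = (List.replicate m (0 : Int)).set j s := by
  apply List.ext_getElem
  · simp [PySem.List.length_pyRange_one]
  · intro t h1 h2
    have ht : t < m := by simpa [PySem.List.length_pyRange_one] using h1
    simp only [List.getElem_map, PySem.List.getElem_pyRange_one, List.getElem_set,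
      List.getElem_replicate, zero_add]
    by_cases he : j = t
    · subst he
      simp
    · have hne : ((t : Int) == (j : Int)) = false := by
        simp only [beq_eq_false_iff_ne, ne_eq, Int.natCast_inj]
        exact Ne.symm he
      simp [hne, he]

-- a fold of inserts never touches an absent key
theorem pv_dict_get_notmem (reas : List String) (name : String) (c : Int)
    (d : PySem.Dict String Int) (h : name ∉ reas) :
    ((PySem.List.enumerate reas c).foldl (fun d p => d.insert p.2 p.1) d).get? name
      = d.get? name := by
  induction reas generalizing c d with
  | nil => simp [PySem.List.enumerate_nil]
  | cons r rs ih =>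
    simp only [PySem.List.enumerate_cons, List.foldl_cons]
    rw [ih (c+1) _ (fun hm => h (List.mem_cons_of_mem _ hm))]
    exact PySem.Dict.get?_insert_of_ne d c (fun he => h (he ▸ List.mem_cons_self))

-- B's name→index dict finds the unique occurrence
theorem pv_dict_get (reas : List String) (name : String) (c : Int)
    (d : PySem.Dict String Int) (h : reas.count name = 1) :
    ((PySem.List.enumerate reas c).foldl (fun d p => d.insert p.2 p.1) d).get? name
      = some (c + (reas.idxOf name : Int)) := by
  induction reas generalizing c d with
  | nil => simp at h
  | cons r rs ih =>
    simp only [PySem.List.enumerate_cons, List.foldl_cons]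
    by_cases hr : r = name
    · subst hr
      have h0 : r ∉ rs := (List.count_eq_zero).mp (by simpa [List.count_cons] using h)
      rw [pv_dict_get_notmem rs r (c+1) _ h0, PySem.Dict.get?_insert_self,
        List.idxOf_cons_self]
      simp
    · have h1 : rs.count name = 1 := by simpa [List.count_cons, hr] using h
      rw [ih (c+1) _ h1, List.idxOf_cons_ne _ hr]
      push_cast
      ring_nf

-- common closed form of both programs (proof-only helper)
def pvTarget (bounds : List (String × Int)) (reactions : List String) : List (List Int) :=
  (PySem.List.enumerate bounds 0).map (fun q =>
    (List.replicate reactions.length (0 : Int)).set (reactions.idxOf (pvName q.2.1))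
        (if pvSuf3 q.2.1 == "max" then 1 else -1)
      ++ (PySem.List.pyRange 0 (bounds.length : Int) 1).map (fun k => if k == q.1 then (1 : Int) else 0)
      ++ [if pvSuf3 q.2.1 == "min" then q.2.2 else -q.2.2])

theorem pv_alt_eq (bounds : List (String × Int)) (reactions : List String)
    (h : ∀ p ∈ bounds, reactions.count (pvName p.1) = 1) :
    putting_slack_metas_together_alt bounds reactions = pvTarget bounds reactions := by
  unfold putting_slack_metas_together_alt pvTarget
  apply List.map_congr_left
  intro q hq
  obtain ⟨k, hk, rfl⟩ := (PySem.List.mem_enumerate_iff _ _ _).mp hq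
  have hc : reactions.count (pvName bounds[k].1) = 1 := h _ (List.getElem_mem hk)
  rw [pv_dict_get reactions _ 0 _ hc]
  simp only [zero_add, PySem.List.pySetD_natCast]

theorem pv_a_eq (bounds : List (String × Int)) (reactions : List String)
    (h : ∀ p ∈ bounds, reactions.count (pvName p.1) = 1) :
    putting_slack_metas_together bounds reactions = pvTarget bounds reactions := by
  unfold putting_slack_metas_together pvExtendReactions pvBuildBoundaryReactions
    pvBuildLambdaReas
  simp only [pv_index_bounds _ _ h, PySem.List.foldl_append_singleton_eq_map, List.nil_append]
  rw [pv_counter_loop bounds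
      (fun c p => (PySem.List.pyRange 0 (reactions.length : Int) 1).map (fun i =>
        if i == PySem.List.pyGetD (bounds.map (fun p => ((reactions.idxOf (pvName p.1) : Int)))) c 0 then
          (if pvSuf3 p.1 == "max" then (1 : Int) else -1) else 0)) [] 0,
    pv_counter_loop bounds
      (fun c _p => (PySem.List.pyRange 0 (bounds.length : Int) 1).map (fun i =>
        if i == c then (1 : Int) else 0)) [] 0]
  simp only [List.nil_append]
  apply List.ext_getElem
  · simp [pvTarget, PySem.List.length_pyRange_one, PySem.List.length_enumerate]
  · intro k h1 h2
    have hkn : k < bounds.length := by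
      simpa [PySem.List.length_pyRange_one] using h1
    have hle : k < (PySem.List.enumerate bounds 0).length := by
      simpa [PySem.List.length_enumerate] using hkn
    have hc : reactions.count (pvName bounds[k].1) = 1 := h _ (List.getElem_mem hkn)
    simp only [pvTarget, List.getElem_map, PySem.List.getElem_pyRange_one,
      PySem.List.getElem_enumerate, zero_add, PySem.List.pyGetD_natCast]
    rw [List.getD_eq_getElem _ _ (by
        simpa [PySem.List.length_enumerate] using hkn),
      List.getD_eq_getElem _ _ (by
        simpa [PySem.List.length_enumerate] using hkn),
      List.getD_eq_getElem _ _ (by simpa using hkn)]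
    simp only [List.getElem_map, PySem.List.getElem_enumerate, zero_add,
      PySem.List.pyGetD_natCast]
    rw [List.getD_eq_getElem _ _ (by simpa using hkn)]
    simp only [List.getElem_map]
    rw [pv_row_eq]
    simp

-- ===== VERDICT (by name: the statement is the Claim_ definition above) =====
theorem putting_slack_metas_together_spec : Claim_equal_putting_slack_metas_together := by
  intro bounds reactions _hdom hpre
  unfold Spec_putting_slack_metas_together
  rw [pv_a_eq _ _ hpre.2, pv_alt_eq _ _ hpre.2]
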